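-- pv_equiv track=rewrite | github.com/solurin/pythonstuff | MainWindow.py | tabify_line_unexposed
-- ===== SOURCE A (Python) =====
-- def tabify_line_unexposed(line, numpertab):
-- 	''' Only tabify the front of the line, not its interior '''
-- 	s = ""
-- 	i = 0
-- 	numblanks_seen = 0
-- 	for ch in line:
-- 		if ch != " ":
-- 			break
-- 		if ch == " ":
-- 			numblanks_seen += 1
-- 		if numblanks_seen == numpertab:
-- 			s += "\t"
-- 			numblanks_seen = 0
-- 		i += 1
-- 	return s + " "*numblanks_seen + line[i:]
-- ===== SOURCE B (Python) =====
-- def tabify_line_unexposed(line, numpertab):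
--     ''' Only tabify the front of the line, not its interior '''
--     n = len(line) - len(line.lstrip(' '))
--     if numpertab <= 0:
--         return line
--     tabs, rem = divmod(n, numpertab)
--     return '\t' * tabs + ' ' * rem + line[n:]
-- ===== Notes on version B (the rewrite author's own statement) =====
-- stated objective: simpler
-- what changed: Replaces A's per-character accumulation loop (with tab-emission counter reset) by one leading-space count via lstrip plus a single divmod and string repetition; numpertab <= 0 returns the line unchanged, matching A which never emits a tab then.
import Mathlib
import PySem

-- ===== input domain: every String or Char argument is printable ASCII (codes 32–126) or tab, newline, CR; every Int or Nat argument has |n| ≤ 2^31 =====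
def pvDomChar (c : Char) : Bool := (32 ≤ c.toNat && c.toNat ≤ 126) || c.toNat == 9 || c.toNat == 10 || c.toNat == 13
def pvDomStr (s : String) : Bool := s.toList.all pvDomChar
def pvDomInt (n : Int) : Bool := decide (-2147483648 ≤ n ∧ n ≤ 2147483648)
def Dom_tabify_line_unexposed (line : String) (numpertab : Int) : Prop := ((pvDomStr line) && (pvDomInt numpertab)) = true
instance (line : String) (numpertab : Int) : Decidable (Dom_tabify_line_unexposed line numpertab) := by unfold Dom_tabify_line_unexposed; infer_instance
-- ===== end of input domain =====

-- B replaces A's per-character loop (tab-emission counter with reset) by one leading-space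
-- count plus a single divmod; simpler decomposition, same cost.


-- ===== PORT A =====
-- the 'for ch in line' loop with its break: state (s, i, numblanks_seen)
def tabifyGoA (numpertab : Int) : List Char → List Char → Nat → Int → List Char × Nat × Int
  | [], s, i, nb => (s, i, nb)
  | ch :: rest, s, i, nb =>
    if ch ≠ ' ' then (s, i, nb)
    else
      let nb := if ch = ' ' then nb + 1 else nb
      if nb = numpertab then tabifyGoA numpertab rest (s ++ ['\t']) (i + 1) 0
      else tabifyGoA numpertab rest s (i + 1) nb

def tabify_line_unexposed (line : String) (numpertab : Int) : String :=
  let r := tabifyGoA numpertab line.toList [] 0 0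
  -- " "*numblanks_seen (numblanks_seen is never negative) and line[i:]
  String.ofList (r.1 ++ List.replicate r.2.2.toNat ' ' ++ PySem.List.slice line.toList (some (r.2.1 : Int)) none)

-- ===== PORT B =====
def tabify_line_unexposed_alt (line : String) (numpertab : Int) : String :=
  -- n = len(line) - len(line.lstrip(' ')): lstrip(' ') strips exactly the leading spaces,
  -- ported by hand as dropWhile (· == ' ') (exact: only the leading run of ' ' is removed)
  let n : Nat := line.toList.length - (line.toList.dropWhile (· == ' ')).length
  if numpertab ≤ 0 then line
  else
    let tabs := PySem.Int.floordiv (n : Int) numpertab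
    let rem := PySem.Int.mod (n : Int) numpertab
    String.ofList (List.replicate tabs.toNat '\t' ++ List.replicate rem.toNat ' ' ++ line.toList.drop n)

-- ===== PRECONDITION & SPEC =====
def Spec_tabify_line_unexposed (line : String) (numpertab : Int) (out : String) : Prop := out = tabify_line_unexposed_alt line numpertab
instance (line : String) (numpertab : Int) (out : String) : Decidable (Spec_tabify_line_unexposed line numpertab out) := by unfold Spec_tabify_line_unexposed; infer_instance

-- ===== CLAIM (what is proved, stated in full; the proofs are below) =====
def Claim_equal_tabify_line_unexposed : Prop := ∀ (line : String) (numpertab : Int), Dom_tabify_line_unexposed line numpertab → Spec_tabify_line_unexposed line numpertab (tabify_line_unexposed line numpertab)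

-- ===== LEMMAS AND PROOFS =====

-- number of leading spaces
def spCount (cs : List Char) : Nat := (cs.takeWhile (· == ' ')).length

lemma tabifyGoA_cons_space (np : Int) (rest s : List Char) (i : Nat) (b : Int) :
    tabifyGoA np (' ' :: rest) s i b =
      (if b + 1 = np then tabifyGoA np rest (s ++ ['\t']) (i + 1) 0
       else tabifyGoA np rest s (i + 1) (b + 1)) := by
  simp [tabifyGoA]

lemma tabifyGoA_cons_other (np : Int) {ch : Char} (h : ch ≠ ' ') (rest s : List Char) (i : Nat) (b : Int) :
    tabifyGoA np (ch :: rest) s i b = (s, i, b) := by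
  simp [tabifyGoA, h]

lemma spCount_cons_space (rest : List Char) : spCount (' ' :: rest) = spCount rest + 1 := by
  simp [spCount]

lemma spCount_cons_other {ch : Char} (h : ch ≠ ' ') (rest : List Char) : spCount (ch :: rest) = 0 := by
  simp [spCount, h]

lemma drop_spCount (cs : List Char) : cs.drop (spCount cs) = cs.dropWhile (· == ' ') := by
  induction cs with
  | nil => simp [spCount]
  | cons c rest ih =>
    by_cases h : c = ' '
    · subst h; simpa [spCount, List.takeWhile_cons, List.dropWhile_cons] using ih
    · simp [spCount, h]

lemma spCount_eq_sub (cs : List Char) :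
    spCount cs = cs.length - (cs.dropWhile (· == ' ')).length := by
  have h := congrArg List.length (List.takeWhile_append_dropWhile (p := (· == ' ')) (l := cs))
  rw [List.length_append] at h
  unfold spCount; omega

lemma takeWhile_sp_eq_replicate (cs : List Char) :
    cs.takeWhile (· == ' ') = List.replicate (spCount cs) ' ' := by
  induction cs with
  | nil => simp [spCount]
  | cons c rest ih =>
    by_cases h : c = ' '
    · subst h; simp [spCount, List.replicate_succ] at ih ⊢; exact ih
    · simp [spCount, h]

-- A's loop when numpertab ≤ 0: the tab branch never fires
lemma tabifyGoA_nonpos (np : Int) (hnp : np ≤ 0) (cs : List Char) (s : List Char) (i : Nat) (b : Nat) :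
    tabifyGoA np cs s i (b : Int) = (s, i + spCount cs, ((b + spCount cs : Nat) : Int)) := by
  induction cs generalizing s i b with
  | nil => simp [tabifyGoA, spCount]
  | cons c rest ih =>
    by_cases h : c = ' '
    · subst h
      rw [tabifyGoA_cons_space, if_neg (by omega)]
      rw [show ((b : Int) + 1) = ((b + 1 : Nat) : Int) by push_cast; ring, ih]
      rw [spCount_cons_space]
      refine Prod.ext rfl (Prod.ext ?_ ?_) <;> simp <;> omega
    · rw [tabifyGoA_cons_other np h, spCount_cons_other h]
      simp

-- A's loop when numpertab = m > 0: tabs-and-remainder invariant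
lemma tabifyGoA_pos (m : Nat) (hm : 0 < m) (cs : List Char) (s : List Char) (i : Nat) (b : Nat) (hb : b < m) :
    tabifyGoA (m : Int) cs s i (b : Int) =
      (s ++ List.replicate ((b + spCount cs) / m) '\t', i + spCount cs, (((b + spCount cs) % m : Nat) : Int)) := by
  induction cs generalizing s i b with
  | nil =>
    simp [tabifyGoA, spCount, Nat.div_eq_of_lt hb, Nat.mod_eq_of_lt hb]
  | cons c rest ih =>
    by_cases h : c = ' '
    · subst h
      rw [tabifyGoA_cons_space, spCount_cons_space]
      by_cases he : b + 1 = m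
      · rw [if_pos (by omega)]
        rw [show (0 : Int) = ((0 : Nat) : Int) from rfl, ih (s ++ ['\t']) (i + 1) 0 hm]
        refine Prod.ext ?_ (Prod.ext ?_ ?_)
        · show s ++ ['\t'] ++ _ = s ++ _
          rw [show b + (spCount rest + 1) = spCount rest + m by omega,
              Nat.add_div_right _ hm, List.replicate_succ]
          simp
        · show i + 1 + spCount rest = i + (spCount rest + 1); omega
        · show (((0 + spCount rest) % m : Nat) : Int) = (((b + (spCount rest + 1)) % m : Nat) : Int)
          congr 1
          rw [Nat.zero_add, show b + (spCount rest + 1) = spCount rest + m by omega, Nat.add_mod_right]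
      · have hb' : b + 1 < m := by omega
        rw [if_neg (by omega)]
        rw [show ((b : Int) + 1) = ((b + 1 : Nat) : Int) by push_cast; ring, ih s (i + 1) (b + 1) hb']
        rw [show b + 1 + spCount rest = b + (spCount rest + 1) by omega,
            show i + 1 + spCount rest = i + (spCount rest + 1) by omega]
    · rw [tabifyGoA_cons_other _ h, spCount_cons_other h]
      simp [Nat.div_eq_of_lt hb, Nat.mod_eq_of_lt hb]

-- ===== VERDICT (by name: the statement is the Claim_ definition above) =====
theorem tabify_line_unexposed_spec : Claim_equal_tabify_line_unexposed := by
  intro line numpertab _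
  unfold Spec_tabify_line_unexposed tabify_line_unexposed tabify_line_unexposed_alt
  rw [← spCount_eq_sub line.toList]
  by_cases hnp : numpertab ≤ 0
  · rw [if_pos hnp]
    rw [show (0 : Int) = ((0 : Nat) : Int) from rfl,
        tabifyGoA_nonpos numpertab hnp line.toList [] 0 0]
    simp only [Int.toNat_natCast, Nat.zero_add, List.nil_append]
    rw [PySem.List.slice_from_natCast, drop_spCount, ← takeWhile_sp_eq_replicate,
        List.takeWhile_append_dropWhile]
    exact String.ofList_toList
  · rw [if_neg hnp]
    have hnp' : 0 < numpertab := by omega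
    have hmcast : ((numpertab.toNat : Nat) : Int) = numpertab := Int.toNat_of_nonneg (by omega)
    rw [← hmcast, show (0 : Int) = ((0 : Nat) : Int) from rfl,
        tabifyGoA_pos numpertab.toNat (by omega) line.toList [] 0 0 (by omega)]
    simp only [Int.toNat_natCast, Nat.zero_add, List.nil_append,
      PySem.List.slice_from_natCast, PySem.Int.floordiv_natCast, PySem.Int.mod_natCast]
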